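-- pv_equiv track=rewrite | github.com/maberrocal/NLP_language_detection | ngramfreq.py | _compare_ngram_frequency_profiles
-- ===== SOURCE A (Python) =====
-- def _compare_ngram_frequency_profiles(category_profile, document_profile):
--
--     """
--     @param category_profile, document_profile: Ngram profiles
--     @type category_profile, document_profile: list
--
--     @return: Document distance
--     @rtype: int
--     """
--
--     document_distance = 0
--
--     # Ngrams not stored in language profile
--     maximum_out_of_place_value = len(category_profile) + 1
--
--     for ngram in document_profile:
--         # pick up index position of document ngram
--         document_index = document_profile.index(ngram)
--         try:
--             # check if analyzed ngram exists in pre-computed language profile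
--             category_profile_index = category_profile.index(ngram)
--             distance = abs(category_profile_index - document_index)
--         except ValueError:
--             '''
--             If an Ngram is not in the language profile it takes the maximum out-of-place value.
--             '''
--             category_profile_index = maximum_out_of_place_value
--             distance = category_profile_index
--
--         '''
--         The sum of all of the out-of-place values for all Ngrams is the
--         distance measure for the document from the language profile.
--         '''
--         document_distance += distance
--
--     return document_distance
-- ===== SOURCE B (Python) =====
-- def _compare_ngram_frequency_profiles(category_profile, document_profile):
--     # Multiplicity and first position of each distinct document ngram.
--     counts = {}
--     for g in document_profile:
--         counts[g] = counts.get(g, 0) + 1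
--     first_doc = {}
--     for i, g in enumerate(document_profile):
--         first_doc.setdefault(g, i)
--     # Sweep the category profile once: the first category occurrence of each
--     # shared ngram settles all of that ngram's document occurrences at once.
--     seen = set()
--     total = 0
--     for ci, g in enumerate(category_profile):
--         if g in counts and g not in seen:
--             seen.add(g)
--             total += counts[g] * abs(ci - first_doc[g])
--     # Document occurrences of ngrams absent from the category profile all get
--     # the maximum out-of-place value, added in one closed-form step.
--     missed = 0
--     for g, c in counts.items():
--         if g not in seen:
--             missed += c
--     return total + (len(category_profile) + 1) * missed
-- ===== Notes on version B (the rewrite author's own statement) =====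
-- stated objective: faster
-- what changed: Instead of A's per-occurrence loop over the document with linear .index scans, B groups the document into multiplicity/first-position tables, sweeps the CATEGORY profile once settling each shared ngram (weighted by its multiplicity) at its first category position, and adds all misses in one closed-form step.
import Mathlib
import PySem

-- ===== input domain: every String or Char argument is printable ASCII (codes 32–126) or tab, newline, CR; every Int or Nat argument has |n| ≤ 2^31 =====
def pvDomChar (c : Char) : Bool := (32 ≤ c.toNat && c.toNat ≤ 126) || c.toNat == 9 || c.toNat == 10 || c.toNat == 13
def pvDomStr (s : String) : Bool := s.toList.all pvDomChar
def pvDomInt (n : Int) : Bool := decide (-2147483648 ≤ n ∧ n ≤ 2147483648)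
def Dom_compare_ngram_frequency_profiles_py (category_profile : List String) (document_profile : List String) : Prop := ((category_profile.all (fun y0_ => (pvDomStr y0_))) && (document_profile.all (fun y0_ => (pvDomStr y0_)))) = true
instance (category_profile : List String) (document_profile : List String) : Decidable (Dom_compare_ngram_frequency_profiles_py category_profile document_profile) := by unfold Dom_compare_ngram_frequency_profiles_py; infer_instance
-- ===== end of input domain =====

-- B replaces A's per-occurrence document loop with linear .index scans by a grouped,
-- category-driven sweep (multiplicity/first-position tables, one pass over the category
-- profile, misses added in one closed-form step); a timing run measures it faster.

-- ===== PORT A =====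
-- literal transliteration of A: for each ngram of document_profile, scan with .index
-- (document_profile.index(ngram) always succeeds since ngram ∈ document_profile; .getD 0 is unreachable)
def compare_ngram_frequency_profiles_py (category_profile : List String) (document_profile : List String) : Int :=
  let maximum_out_of_place_value : Int := (category_profile.length : Int) + 1
  document_profile.foldl (fun document_distance ngram =>
    let document_index : Int := ((PySem.List.index? document_profile ngram).getD 0 : Nat)
    let distance : Int :=
      match PySem.List.index? category_profile ngram with
      | some category_profile_index => |(category_profile_index : Int) - document_index|
      | none => maximum_out_of_place_value
    document_distance + distance) 0

-- ===== PORT B =====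
-- transliteration of Source B: multiplicity dict (counts[g] = counts.get(g,0)+1), first-position
-- dict via setdefault, then one sweep over enumerate(category_profile) with a seen set,
-- and the misses added in closed form.  (counts[g] / first_doc[g] inside the sweep always
-- succeed since g was recorded for every document ngram; the .getD … 0 are unreachable.)
def compare_ngram_frequency_profiles_py_alt (category_profile : List String) (document_profile : List String) : Int :=
  let counts : PySem.Dict String Int :=
    document_profile.foldl (fun d g => d.modify g 0 (· + 1)) PySem.Dict.empty
  let first_doc : PySem.Dict String Int :=
    (PySem.List.enumerate document_profile 0).foldl (fun d p => d.setdefault p.2 p.1) PySem.Dict.empty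
  let sweep : PySem.Set String × Int :=
    (PySem.List.enumerate category_profile 0).foldl (fun st p =>
      if counts.contains p.2 && !(PySem.Set.contains st.1 p.2) then
        (PySem.Set.add st.1 p.2, st.2 + counts.getD p.2 0 * |p.1 - first_doc.getD p.2 0|)
      else st) (PySem.Set.empty, 0)
  let missed : Int :=
    counts.items.foldl (fun m p => if PySem.Set.contains sweep.1 p.1 then m else m + p.2) 0
  sweep.2 + ((category_profile.length : Int) + 1) * missed

-- ===== PRECONDITION & SPEC =====
def Spec_compare_ngram_frequency_profiles_py (category_profile : List String) (document_profile : List String) (out : Int) : Prop := out = compare_ngram_frequency_profiles_py_alt category_profile document_profile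
instance (category_profile : List String) (document_profile : List String) (out : Int) : Decidable (Spec_compare_ngram_frequency_profiles_py category_profile document_profile out) := by unfold Spec_compare_ngram_frequency_profiles_py; infer_instance

-- ===== CLAIM (what is proved, stated in full; the proofs are below) =====
def Claim_equal_compare_ngram_frequency_profiles_py : Prop := ∀ (category_profile : List String) (document_profile : List String), Dom_compare_ngram_frequency_profiles_py category_profile document_profile → Spec_compare_ngram_frequency_profiles_py category_profile document_profile (compare_ngram_frequency_profiles_py category_profile document_profile)

-- ===== LEMMAS AND PROOFS =====

-- the out-of-place value A assigns to one occurrence of ngram g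
def pvF (cat doc : List String) (g : String) : Int :=
  match PySem.List.index? cat g with
  | some ci => |(ci : Int) - ((PySem.List.index? doc g).getD 0 : Nat)|
  | none => (cat.length : Int) + 1

-- B's sweep step, named for the lemmas
def pvStep (cnts fd : PySem.Dict String Int) (st : PySem.Set String × Int) (p : Int × String) :
    PySem.Set String × Int :=
  if cnts.contains p.2 && !(PySem.Set.contains st.1 p.2) then
    (PySem.Set.add st.1 p.2, st.2 + cnts.getD p.2 0 * |p.1 - fd.getD p.2 0|)
  else st

-- A is the sum of pvF over the document occurrences
theorem pvA_eq_sum (cat doc : List String) :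
    compare_ngram_frequency_profiles_py cat doc = (doc.map (pvF cat doc)).sum := by
  unfold compare_ngram_frequency_profiles_py
  have := PySem.List.foldl_add doc (pvF cat doc) 0
  simpa [pvF] using this

theorem pv_contains_eq (s : PySem.Set String) (g : String) :
    PySem.Set.contains s g = decide (g ∈ s) := by
  by_cases h : g ∈ s <;> simp [PySem.Set.contains, h]

-- the setdefault-fold over enumerate builds the first-occurrence index map
theorem pv_build_get? (xs : List String) (s : Int) (d : PySem.Dict String Int) (g : String) :
    ((PySem.List.enumerate xs s).foldl (fun d p => d.setdefault p.2 p.1) d).get? g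
      = (if (d.get? g).isSome then d.get? g
         else (PySem.List.index? xs g).map (fun k => s + (k : Int))) := by
  induction xs generalizing s d with
  | nil =>
    cases h : d.get? g <;>
      simp [PySem.List.enumerate_nil, PySem.List.index?_eq_idxOf?, h]
  | cons x xs ih =>
    rw [PySem.List.enumerate_cons, List.foldl_cons, ih]
    by_cases hx : x = g
    · subst hx
      rw [show ((s, x).1 : Int) = s from rfl, show (s, x).2 = x from rfl,
        PySem.Dict.get?_setdefault_self, PySem.List.index?_cons_self]
      cases h : d.get? x <;> simp
    · rw [show ((s, x).1 : Int) = s from rfl, show (s, x).2 = x from rfl,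
        PySem.Dict.get?_setdefault_of_ne d s (Ne.symm hx),
        PySem.List.index?_cons_of_ne xs hx]
      cases h : d.get? g <;> cases h2 : PySem.List.index? xs g <;> (simp; try ring)

theorem pv_first_getD (doc : List String) (g : String) (hg : g ∈ doc) :
    ((PySem.List.enumerate doc 0).foldl (fun d p => d.setdefault p.2 p.1)
        PySem.Dict.empty).getD g 0 = (((PySem.List.index? doc g).getD 0 : Nat) : Int) := by
  rcases Option.isSome_iff_exists.mp ((PySem.List.index?_isSome_iff doc g).mpr hg) with ⟨k, hk⟩
  rw [PySem.Dict.getD_eq_get?_getD, pv_build_get?, hk]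
  simp [PySem.Dict.get?_empty]

theorem pv_contains_add (s : PySem.Set String) (x g : String) :
    PySem.Set.contains (PySem.Set.add s x) g
      = (PySem.Set.contains s g || g == x) := by
  by_cases h : g = x <;> simp [pv_contains_eq, PySem.Set.mem_add, h]

-- after the sweep, the seen set holds exactly the counted ngrams met in cat
theorem pv_sweep_seen (cnts fd : PySem.Dict String Int) (cat : List String) (s : Int)
    (seen : PySem.Set String) (total : Int) (g : String) :
    PySem.Set.contains ((PySem.List.enumerate cat s).foldl (pvStep cnts fd) (seen, total)).1 g
      = (PySem.Set.contains seen g || (cnts.contains g && decide (g ∈ cat))) := by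
  induction cat generalizing s seen total with
  | nil => simp [PySem.List.enumerate_nil]
  | cons x rest ih =>
    rw [PySem.List.enumerate_cons, List.foldl_cons]
    by_cases h : (cnts.contains x && !(PySem.Set.contains seen x)) = true
    · have hstep : pvStep cnts fd (seen, total) (s, x)
          = (PySem.Set.add seen x, total + cnts.getD x 0 * |s - fd.getD x 0|) := by
        simp only [pvStep]; rw [if_pos h]
      rw [hstep, ih, pv_contains_add]
      by_cases hg : g = x
      · subst hg
        simp only [Bool.and_eq_true, Bool.not_eq_true'] at h
        simp [pv_contains_eq] at h
        simp [h.1, h.2]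
      · have hbx : (g == x) = false := by simpa using hg
        simp [hbx, hg]
    · have hstep : pvStep cnts fd (seen, total) (s, x) = (seen, total) := by
        simp only [pvStep]; rw [if_neg h]
      rw [hstep, ih]
      by_cases hg : g = x
      · subst hg
        rcases Bool.and_eq_false_iff.mp (Bool.eq_false_iff.mpr h) with h1 | h1
        · simp [h1]
        · have : PySem.Set.contains seen g = true := by
            cases hc : PySem.Set.contains seen g
            · rw [hc] at h1; simp at h1
            · rfl
          rw [pv_contains_eq] at this
          simp [this]
      · simp [hg]

-- the sweep total: each qualifying distinct ngram contributes once, at its first cat position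
theorem pv_sweep_total (cnts fd : PySem.Dict String Int) (cat : List String) (s : Int)
    (seen : PySem.Set String) (total : Int) :
    ((PySem.List.enumerate cat s).foldl (pvStep cnts fd) (seen, total)).2
      = total + ∑ m ∈ cat.toFinset.filter
            (fun m => cnts.contains m = true ∧ PySem.Set.contains seen m = false),
          cnts.getD m 0 * |s + (((PySem.List.index? cat m).getD 0 : Nat) : Int) - fd.getD m 0| := by
  induction cat generalizing s seen total with
  | nil => simp [PySem.List.enumerate_nil]
  | cons x rest ih =>
    rw [PySem.List.enumerate_cons, List.foldl_cons]
    by_cases h : (cnts.contains x && !(PySem.Set.contains seen x)) = true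
    · have hx : cnts.contains x = true ∧ PySem.Set.contains seen x = false := by
        simpa only [Bool.and_eq_true, Bool.not_eq_true'] using h
      have hstep : pvStep cnts fd (seen, total) (s, x)
          = (PySem.Set.add seen x, total + cnts.getD x 0 * |s - fd.getD x 0|) := by
        simp only [pvStep]; rw [if_pos h]
      rw [hstep, ih]
      have hset : ((x :: rest).toFinset.filter
            (fun m => cnts.contains m = true ∧ PySem.Set.contains seen m = false))
          = insert x (rest.toFinset.filter
            (fun m => cnts.contains m = true ∧ PySem.Set.contains (PySem.Set.add seen x) m = false)) := by
        have hns : x ∉ seen := by simpa [pv_contains_eq] using hx.2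
        ext m
        by_cases hm : m = x
        · subst hm; simp [hx.1, hns, pv_contains_eq, PySem.Set.mem_add]
        · simp [hm, pv_contains_eq, PySem.Set.mem_add]
      have hx_not : x ∉ rest.toFinset.filter
          (fun m => cnts.contains m = true ∧ PySem.Set.contains (PySem.Set.add seen x) m = false) := by
        simp [pv_contains_eq, PySem.Set.mem_add]
      rw [hset, Finset.sum_insert hx_not]
      have hterm : cnts.getD x 0 * |s + (((PySem.List.index? (x :: rest) x).getD 0 : Nat) : Int) - fd.getD x 0|
          = cnts.getD x 0 * |s - fd.getD x 0| := by
        rw [PySem.List.index?_cons_self]; norm_num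
      have hsum : ∀ m ∈ rest.toFinset.filter
            (fun m => cnts.contains m = true ∧ PySem.Set.contains (PySem.Set.add seen x) m = false),
          cnts.getD m 0 * |s + (((PySem.List.index? (x :: rest) m).getD 0 : Nat) : Int) - fd.getD m 0|
            = cnts.getD m 0 * |(s + 1) + (((PySem.List.index? rest m).getD 0 : Nat) : Int) - fd.getD m 0| := by
        intro m hm
        simp only [Finset.mem_filter, List.mem_toFinset] at hm
        have hmx : x ≠ m := by
          rintro rfl
          rw [pv_contains_eq] at hm
          simp [PySem.Set.mem_add] at hm
        obtain ⟨k, hk⟩ := Option.isSome_iff_exists.mp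
          ((PySem.List.index?_isSome_iff rest m).mpr hm.1)
        rw [PySem.List.index?_cons_of_ne rest hmx, hk]
        simp only [Option.map_some, Option.getD_some]
        congr 1
        push_cast
        ring
      rw [Finset.sum_congr rfl hsum, hterm]
      rw [add_assoc]
    · have hPx : ¬ (cnts.contains x = true ∧ PySem.Set.contains seen x = false) := by
        intro hc; exact h (by rw [Bool.and_eq_true, Bool.not_eq_true']; exact hc)
      have hstep : pvStep cnts fd (seen, total) (s, x) = (seen, total) := by
        simp only [pvStep]; rw [if_neg h]
      rw [hstep, ih]
      have hset : ((x :: rest).toFinset.filter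
            (fun m => cnts.contains m = true ∧ PySem.Set.contains seen m = false))
          = rest.toFinset.filter
            (fun m => cnts.contains m = true ∧ PySem.Set.contains seen m = false) := by
        ext m
        by_cases hm : m = x
        · subst hm
          simp only [List.toFinset_cons, Finset.mem_filter, Finset.mem_insert, List.mem_toFinset]
          constructor
          · rintro ⟨-, h1, h2⟩
            exact absurd ⟨h1, by simpa [pv_contains_eq] using h2⟩ hPx
          · rintro ⟨hmem, hP⟩
            exact ⟨Or.inr hmem, hP⟩
        · simp [hm]
      rw [hset]
      have hsum : ∀ m ∈ rest.toFinset.filter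
            (fun m => cnts.contains m = true ∧ PySem.Set.contains seen m = false),
          cnts.getD m 0 * |s + (((PySem.List.index? (x :: rest) m).getD 0 : Nat) : Int) - fd.getD m 0|
            = cnts.getD m 0 * |(s + 1) + (((PySem.List.index? rest m).getD 0 : Nat) : Int) - fd.getD m 0| := by
        intro m hm
        simp only [Finset.mem_filter, List.mem_toFinset] at hm
        have hmx : x ≠ m := by rintro rfl; exact hPx hm.2
        obtain ⟨k, hk⟩ := Option.isSome_iff_exists.mp
          ((PySem.List.index?_isSome_iff rest m).mpr hm.1)
        rw [PySem.List.index?_cons_of_ne rest hmx, hk]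
        simp only [Option.map_some, Option.getD_some]
        congr 1
        push_cast
        ring
      rw [Finset.sum_congr rfl hsum]

theorem pv_ofList_toFinset (doc : List String) :
    (PySem.Set.ofList doc).toFinset = doc.toFinset := by
  ext m; simp [PySem.Set.mem_ofList]

-- the miss loop over the counter items, as a Finset sum
theorem pv_foldl_if_sum (doc : List String) (P : String → Bool) (w : String → Int) (a : Int) :
    (PySem.Set.ofList doc).foldl (fun m k => if P k then m else m + w k) a
      = a + ∑ m ∈ doc.toFinset, (if P m then 0 else w m) := by
  have hfun : (fun (m : Int) k => if P k then m else m + w k)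
      = (fun m k => m + if P k then (0:Int) else w k) := by
    funext m k; split <;> simp
  rw [hfun, PySem.List.foldl_add, ← List.sum_toFinset _ (PySem.Set.nodup_ofList doc),
    pv_ofList_toFinset]

theorem pv_main (cat doc : List String) :
    compare_ngram_frequency_profiles_py cat doc
      = compare_ngram_frequency_profiles_py_alt cat doc := by
  have hB : compare_ngram_frequency_profiles_py_alt cat doc =
      ((PySem.List.enumerate cat 0).foldl
          (pvStep (PySem.Dict.counter doc)
            ((PySem.List.enumerate doc 0).foldl (fun d p => d.setdefault p.2 p.1) PySem.Dict.empty))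
          (PySem.Set.empty, 0)).2
        + ((cat.length : Int) + 1) *
          (PySem.Dict.counter doc).items.foldl
            (fun m p => if PySem.Set.contains
                (((PySem.List.enumerate cat 0).foldl
                  (pvStep (PySem.Dict.counter doc)
                    ((PySem.List.enumerate doc 0).foldl (fun d p => d.setdefault p.2 p.1) PySem.Dict.empty))
                  (PySem.Set.empty, 0)).1) p.1 then m else m + p.2) 0 := rfl
  rw [pvA_eq_sum, Finset.sum_list_map_count, hB, pv_sweep_total]
  have hce : ∀ g : String, PySem.Set.contains PySem.Set.empty g = false := fun g => rfl
  simp only [pv_sweep_seen, hce, Bool.false_or, PySem.Dict.items_counter, List.foldl_map]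
  rw [pv_foldl_if_sum doc (fun k => (PySem.Dict.counter doc).contains k && decide (k ∈ cat))
    (fun k => ((doc.count k : Nat) : Int)) 0]
  simp only [zero_add]
  have hTset : cat.toFinset.filter (fun x => (PySem.Dict.counter doc).contains x = true ∧ True)
      = doc.toFinset.filter (fun m => m ∈ cat) := by
    ext m
    simp [PySem.Dict.contains_counter, and_comm]
  rw [hTset]
  have hT : ∑ x ∈ doc.toFinset.filter (fun m => m ∈ cat),
        (PySem.Dict.counter doc).getD x 0 *
          |(((PySem.List.index? cat x).getD 0 : Nat) : Int) -
            ((PySem.List.enumerate doc 0).foldl (fun d p => d.setdefault p.2 p.1)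
              PySem.Dict.empty).getD x 0|
      = ∑ x ∈ doc.toFinset.filter (fun m => m ∈ cat), (List.count x doc) • pvF cat doc x := by
    refine Finset.sum_congr rfl ?_
    intro m hm
    simp only [Finset.mem_filter, List.mem_toFinset] at hm
    obtain ⟨ci, hci⟩ := Option.isSome_iff_exists.mp
      ((PySem.List.index?_isSome_iff cat m).mpr hm.2)
    rw [PySem.Dict.getD_counter, pv_first_getD doc m hm.1]
    rw [PySem.List.index?_eq_idxOf?] at hci
    simp [pvF, PySem.List.index?_eq_idxOf?, hci]
  rw [hT]
  have hMiss : ∑ m ∈ doc.toFinset,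
        (if ((PySem.Dict.counter doc).contains m && decide (m ∈ cat)) = true then 0
         else ((List.count m doc : Nat) : Int))
      = ∑ m ∈ doc.toFinset.filter (fun m => ¬ m ∈ cat), ((List.count m doc : Nat) : Int) := by
    rw [Finset.sum_filter]
    refine Finset.sum_congr rfl ?_
    intro m hm
    simp only [List.mem_toFinset] at hm
    have hcm : (PySem.Dict.counter doc).contains m = true := by
      rw [PySem.Dict.contains_counter]; simp [hm]
    by_cases hc : m ∈ cat <;> simp [hcm, hc]
  rw [hMiss]
  have hF2 : ∑ m ∈ doc.toFinset.filter (fun m => ¬ m ∈ cat), (List.count m doc) • pvF cat doc m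
      = ((cat.length : Int) + 1) *
          ∑ m ∈ doc.toFinset.filter (fun m => ¬ m ∈ cat), ((List.count m doc : Nat) : Int) := by
    rw [Finset.mul_sum]
    refine Finset.sum_congr rfl ?_
    intro m hm
    simp only [Finset.mem_filter, List.mem_toFinset] at hm
    have hnone : PySem.List.index? cat m = none := (PySem.List.index?_eq_none_iff cat m).mpr hm.2
    rw [PySem.List.index?_eq_idxOf?] at hnone
    simp [pvF, PySem.List.index?_eq_idxOf?, hnone]
    ring
  rw [← Finset.sum_filter_add_sum_filter_not doc.toFinset (fun m => m ∈ cat)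
        (fun m => (List.count m doc) • pvF cat doc m), hF2]

-- ===== VERDICT (by name: the statement is the Claim_ definition above) =====
theorem compare_ngram_frequency_profiles_py_spec : Claim_equal_compare_ngram_frequency_profiles_py := by
  intro cat doc _
  exact pv_main cat doc
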